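-- pv_equiv track=rewrite | github.com/desilvsj/TR-Errors-dev | drafts/archive/main-v20250528.py | get_k_tuple_map
-- ===== SOURCE A (Python) =====
-- def get_k_tuple_map(sequence, k):
--     """
--     Given a sequence and a value k, returns a dictionary mapping each unique k-tuple
--     (substring of length k) to a list of indices where it occurs in the sequence.
--     """
--     k_tuple_map = {}
--
--     for i in range(len(sequence) - k + 1):
--         k_tuple = sequence[i:i + k]
--
--         if k_tuple not in k_tuple_map:
--             k_tuple_map[k_tuple] = []
--
--         k_tuple_map[k_tuple].append(i)
--
--     return k_tuple_map
-- ===== SOURCE B (Python) =====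
-- def get_k_tuple_map(sequence, k):
--     """
--     Given a sequence and a value k, returns a dictionary mapping each unique k-tuple
--     (substring of length k) to a list of indices where it occurs in the sequence.
--
--     Two-phase: materialise all (substring, index) pairs, list the distinct
--     substrings in first-occurrence order, then collect each key's indices.
--     """
--     pairs = [(sequence[i:i + k], i) for i in range(len(sequence) - k + 1)]
--     keys = dict.fromkeys(s for s, _ in pairs)
--     return {key: [i for s, i in pairs if s == key] for key in keys}
-- ===== Notes on version B (the rewrite author's own statement) =====
-- stated objective: alternative
-- what changed: Replaces A's single pass that grows dict entries on the fly with a two-phase decomposition: build the (substring, index) pair list once, take the distinct substrings in first-occurrence order, then collect each key's indices by a per-key scan of the pair list.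
import Mathlib
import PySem

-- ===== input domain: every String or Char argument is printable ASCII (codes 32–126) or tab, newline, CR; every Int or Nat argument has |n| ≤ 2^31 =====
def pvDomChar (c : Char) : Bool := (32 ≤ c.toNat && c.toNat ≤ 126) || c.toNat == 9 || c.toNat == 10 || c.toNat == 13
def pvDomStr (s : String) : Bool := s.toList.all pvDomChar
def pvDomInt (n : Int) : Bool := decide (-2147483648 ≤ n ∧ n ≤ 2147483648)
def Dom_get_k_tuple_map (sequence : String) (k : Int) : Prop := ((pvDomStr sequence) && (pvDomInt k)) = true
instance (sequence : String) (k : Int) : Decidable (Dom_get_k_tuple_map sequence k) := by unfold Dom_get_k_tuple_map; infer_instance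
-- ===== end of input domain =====

-- B replaces A's hash-on-the-fly single pass with a two-phase decomposition
-- (pair list, then first-occurrence key list, then per-key collection);
-- objective: alternative (same results, genuinely different structure, not faster).


-- ===== PORT A =====
-- for i in range(len(sequence)-k+1): t = sequence[i:i+k]; if t not in m: m[t] = []; m[t].append(i)
def get_k_tuple_map (sequence : String) (k : Int) : List (String × List Int) :=
  let d := (PySem.List.pyRange 0 (PySem.Str.len sequence - k + 1) 1).foldl
    (fun d i =>
      let t := PySem.Str.slice sequence (some i) (some (i + k))
      let d1 := if d.contains t then d else d.insert t ([] : List Int)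
      d1.modify t [] (fun l => l ++ [i]))
    PySem.Dict.empty
  d.items

-- ===== PORT B =====
-- pairs = [(sequence[i:i+k], i) …]; keys = dict.fromkeys(…); {key: [i for s,i in pairs if s==key] for key in keys}
def get_k_tuple_map_alt (sequence : String) (k : Int) : List (String × List Int) :=
  let pairs := (PySem.List.pyRange 0 (PySem.Str.len sequence - k + 1) 1).map
      (fun i => (PySem.Str.slice sequence (some i) (some (i + k)), i))
  let keys := PySem.List.dedup (pairs.map Prod.fst)
  keys.map (fun key => (key, (pairs.filter (fun p => p.1 == key)).map (fun p => p.2)))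

-- ===== PRECONDITION & SPEC =====
def Spec_get_k_tuple_map (sequence : String) (k : Int) (out : List (String × List Int)) : Prop := out = get_k_tuple_map_alt sequence k
instance (sequence : String) (k : Int) (out : List (String × List Int)) : Decidable (Spec_get_k_tuple_map sequence k out) := by unfold Spec_get_k_tuple_map; infer_instance

-- ===== CLAIM (what is proved, stated in full; the proofs are below) =====
def Claim_equal_get_k_tuple_map : Prop := ∀ (sequence : String) (k : Int), Dom_get_k_tuple_map sequence k → Spec_get_k_tuple_map sequence k (get_k_tuple_map sequence k)

-- ===== LEMMAS AND PROOFS =====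

-- A's "if t not in m: m[t] = []" followed by the in-place append is one modify with default []
theorem pv_step_eq {d : PySem.Dict String (List Int)} (t : String) (i : Int) :
    (if d.contains t then d else d.insert t ([] : List Int)).modify t [] (fun l => l ++ [i])
      = d.modify t [] (fun l => l ++ [i]) := by
  by_cases h : d.contains t
  · simp [h]
  · have h' : d.contains t = false := by simpa using h
    simp only [h', Bool.false_eq_true, if_false, PySem.Dict.modify]
    rw [PySem.Dict.getD_insert_self, PySem.Dict.insert_insert_self,
      PySem.Dict.getD_of_not_contains d _ h']

theorem get_k_tuple_map_eq (sequence : String) (k : Int) :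
    get_k_tuple_map sequence k = get_k_tuple_map_alt sequence k := by
  unfold get_k_tuple_map get_k_tuple_map_alt
  set r := PySem.List.pyRange 0 (PySem.Str.len sequence - k + 1) 1 with hr
  set sub := fun i : Int => PySem.Str.slice sequence (some i) (some (i + k)) with hsub
  -- rewrite A's fold: drop the redundant insert, then fold over the pair list
  have hcongr :
      r.foldl (fun d i =>
          (if d.contains (sub i) then d else d.insert (sub i) ([] : List Int)).modify (sub i) []
            (fun l => l ++ [i])) PySem.Dict.empty
        = (r.map (fun i => (sub i, i))).foldl
            (fun d p => d.modify p.1 [] (fun l => l ++ [p.2])) PySem.Dict.empty := by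
    rw [List.foldl_map]
    exact PySem.List.foldl_congr_mem _ _ _ _ (fun d i _ => pv_step_eq (sub i) i)
  simp only []
  rw [hcongr]
  set pairs := r.map (fun i => (sub i, i)) with hpairs
  set D := pairs.foldl (fun d p => d.modify p.1 [] (fun l => l ++ [p.2])) PySem.Dict.empty with hD
  have hkeys : D.keys = PySem.Set.ofList (pairs.map Prod.fst) := by
    rw [hD, PySem.Dict.keys_foldl_modify_key pairs Prod.fst [] (fun _ p => fun l => l ++ [p.2])]
    simp [PySem.Set.update_nil_left, PySem.Dict.keys_empty]
  have hnd : D.keys.Nodup := by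
    rw [hkeys]; exact PySem.Set.nodup_ofList _
  rw [PySem.Dict.items_eq_map_keys D hnd []]
  rw [hkeys]
  simp only [PySem.List.dedup_eq_ofList]
  apply List.map_congr_left
  intro c _
  congr 1
  rw [hD, PySem.Dict.getD_foldl_modify_append]
  simp [PySem.Dict.getD_empty]

-- ===== VERDICT (by name: the statement is the Claim_ definition above) =====
theorem get_k_tuple_map_spec : Claim_equal_get_k_tuple_map := by
  intro sequence k _
  unfold Spec_get_k_tuple_map
  exact get_k_tuple_map_eq sequence k
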